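-- pv_equiv track=rewrite | github.com/kongtaehun/CodingTestPrac | BAEKJOON/기출,실전대비/(구현,문자열)2607-비슷한단어.py | check
-- ===== SOURCE A (Python) =====
-- def check(word1, word2):
--     if abs(len(word1) - len(word2)) <= 1:
--         len_word2 = 0
--         word2_list = list(word2)
--         word1_list = list(word1)
--         for i in word1_list:
--             if i in word2_list:
--                 word2_list.remove(i)
--         len_word2 = len(word2_list)
--         word2_list = list(word2)
--         for i in word2_list:
--             if i in word1_list:
--                 word1_list.remove(i)
--         if len(word1_list) <= 1 and len_word2 <= 1:
--             return True
--
--     return False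
-- ===== SOURCE B (Python) =====
-- def check(word1, word2):
--     a = sorted(word1)
--     b = sorted(word2)
--     i = j = 0
--     a_only = b_only = 0
--     while i < len(a) and j < len(b):
--         if a[i] == b[j]:
--             i += 1
--             j += 1
--         elif a[i] < b[j]:
--             a_only += 1
--             i += 1
--         else:
--             b_only += 1
--             j += 1
--     a_only += len(a) - i
--     b_only += len(b) - j
--     return a_only <= 1 and b_only <= 1
-- ===== Notes on version B (the rewrite author's own statement) =====
-- stated objective: alternative
-- what changed: Replaced the two quadratic remove-scan passes (repeated membership test + list.remove) by sorting both words and a single linear two-pointer merge counting chars unique to each side; the explicit length guard is dropped since both residuals being <= 1 implies it.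
import Mathlib
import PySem

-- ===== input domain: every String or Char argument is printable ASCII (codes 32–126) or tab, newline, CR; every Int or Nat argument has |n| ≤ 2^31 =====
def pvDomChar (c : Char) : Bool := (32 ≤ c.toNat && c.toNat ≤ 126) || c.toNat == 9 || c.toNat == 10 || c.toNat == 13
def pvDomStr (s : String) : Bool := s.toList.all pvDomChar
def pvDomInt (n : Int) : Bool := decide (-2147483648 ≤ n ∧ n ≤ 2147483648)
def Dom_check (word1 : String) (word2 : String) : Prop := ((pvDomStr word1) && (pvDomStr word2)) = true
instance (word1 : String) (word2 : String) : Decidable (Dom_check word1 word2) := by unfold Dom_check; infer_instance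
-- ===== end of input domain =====

-- B sorts both words and counts the chars unique to each side with one two-pointer merge,
-- instead of A's two remove-scan passes; the length guard is implied and dropped.

-- ===== PORT A =====
-- one step of A's 'for i in …: if i in acc: acc.remove(i)' loop; the membership guard
-- makes remove? always succeed, so getD never takes its default
def checkRemoveStep (acc : List Char) (i : Char) : List Char :=
  if acc.contains i then (PySem.List.remove? acc i).getD acc else acc

def check (word1 : String) (word2 : String) : Bool :=
  if (((word1.toList.length : Int) - (word2.toList.length : Int)).natAbs : Int) ≤ 1 then
    let word2_list := word2.toList
    let word1_list := word1.toList
    let word2_list' := word1_list.foldl checkRemoveStep word2_list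
    let len_word2 := word2_list'.length
    let word2_list := word2.toList
    let word1_list' := word2_list.foldl checkRemoveStep word1_list
    if word1_list'.length ≤ 1 ∧ len_word2 ≤ 1 then true
    else false
  else false

-- ===== PORT B =====
-- the while loop of Source B: two pointers over the sorted lists, counting leftovers
def mergeCount : List Char → List Char → Nat × Nat
  | [], ys => (0, ys.length)
  | x :: xs, [] => ((x :: xs).length, 0)
  | x :: xs, y :: ys =>
    if x = y then mergeCount xs ys
    else if x < y then
      let p := mergeCount xs (y :: ys); (p.1 + 1, p.2)
    else
      let p := mergeCount (x :: xs) ys; (p.1, p.2 + 1)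
  termination_by xs ys => xs.length + ys.length

def check_alt (word1 : String) (word2 : String) : Bool :=
  let a := PySem.List.sorted word1.toList (fun x => x) false
  let b := PySem.List.sorted word2.toList (fun x => x) false
  let p := mergeCount a b
  decide (p.1 ≤ 1) && decide (p.2 ≤ 1)

-- ===== PRECONDITION & SPEC =====
def Spec_check (word1 : String) (word2 : String) (out : Bool) : Prop := out = check_alt word1 word2
instance (word1 : String) (word2 : String) (out : Bool) : Decidable (Spec_check word1 word2 out) := by unfold Spec_check; infer_instance

-- ===== CLAIM (what is proved, stated in full; the proofs are below) =====
def Claim_equal_check : Prop := ∀ (word1 : String) (word2 : String), Dom_check word1 word2 → Spec_check word1 word2 (check word1 word2)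

-- ===== LEMMAS AND PROOFS =====

-- A's guarded remove step is List.erase
theorem checkRemoveStep_eq_erase (acc : List Char) (i : Char) :
    checkRemoveStep acc i = acc.erase i := by
  unfold checkRemoveStep
  by_cases h : i ∈ acc
  · simp [h, PySem.List.remove?_eq_some_erase acc i h]
  · simp [h, List.erase_of_not_mem h]

-- A's loop over `items`, erasing from `init`, is list difference
theorem foldl_checkRemoveStep (init items : List Char) :
    items.foldl checkRemoveStep init = init.diff items := by
  have hf : checkRemoveStep = List.erase := by
    funext acc i; exact checkRemoveStep_eq_erase acc i
  rw [hf, List.diff_eq_foldl]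

theorem cons_sub_of_not_mem {x : Char} {s t : Multiset Char} (h : x ∉ t) :
    (x ::ₘ s) - t = x ::ₘ (s - t) := by
  ext a
  by_cases hax : a = x
  · subst hax
    simp [Multiset.count_sub, Multiset.count_eq_zero_of_notMem h]
  · simp [Multiset.count_sub, Multiset.count_cons_of_ne hax]

-- x = y step of the merge: the common head cancels in both differences
theorem coe_cons_sub_cons (c : Char) (s t : List Char) :
    ((c :: s : List Char) : Multiset Char) - ((c :: t : List Char) : Multiset Char)
      = (s : Multiset Char) - (t : Multiset Char) := by
  rw [← Multiset.cons_coe, ← Multiset.cons_coe, Multiset.sub_cons, Multiset.erase_cons_head]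

-- the merge on sorted lists computes the two multiset-difference cardinalities
theorem mergeCount_spec_aux : ∀ (n : Nat) (xs ys : List Char), xs.length + ys.length ≤ n →
    xs.Pairwise (· ≤ ·) → ys.Pairwise (· ≤ ·) →
    mergeCount xs ys =
      (((xs : Multiset Char) - (ys : Multiset Char)).card,
       ((ys : Multiset Char) - (xs : Multiset Char)).card) := by
  intro n
  induction n with
  | zero =>
    intro xs ys h _ _
    match xs, ys with
    | [], [] => simp [mergeCount]
    | x :: xs, _ => simp at h
    | [], y :: ys => simp at h
  | succ n ih =>
    intro xs ys h hx hy
    match xs, ys with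
    | [], ys => simp [mergeCount]
    | x :: xs, [] => simp [mergeCount]
    | x :: xs, y :: ys =>
      have hxs := (List.pairwise_cons.mp hx).2
      have hys := (List.pairwise_cons.mp hy).2
      simp only [List.length_cons] at h
      by_cases hxy : x = y
      · subst hxy
        rw [show mergeCount (x :: xs) (x :: ys) = mergeCount xs ys from by simp [mergeCount],
          ih xs ys (by omega) hxs hys, coe_cons_sub_cons, coe_cons_sub_cons]
      · by_cases hlt : x < y
        · have hnm : x ∉ ((y :: ys : List Char) : Multiset Char) := by
            intro hmem
            rcases List.mem_cons.mp (Multiset.mem_coe.mp hmem) with hm | hm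
            · exact hxy hm
            · exact absurd hlt (not_lt.mpr ((List.pairwise_cons.mp hy).1 x hm))
          have e1 : ((x :: xs : List Char) : Multiset Char) - ((y :: ys : List Char) : Multiset Char)
              = x ::ₘ ((xs : Multiset Char) - ((y :: ys : List Char) : Multiset Char)) := by
            rw [show ((x :: xs : List Char) : Multiset Char) = x ::ₘ (xs : Multiset Char) from
              (Multiset.cons_coe x xs).symm]
            exact cons_sub_of_not_mem hnm
          have e2 : ((y :: ys : List Char) : Multiset Char) - ((x :: xs : List Char) : Multiset Char)
              = ((y :: ys : List Char) : Multiset Char) - (xs : Multiset Char) := by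
            rw [show ((x :: xs : List Char) : Multiset Char) = x ::ₘ (xs : Multiset Char) from
              (Multiset.cons_coe x xs).symm, Multiset.sub_cons, Multiset.erase_of_notMem hnm]
          simp only [mergeCount, if_neg hxy, if_pos hlt,
            ih xs (y :: ys) (by simp; omega) hxs hy, e1, e2, Multiset.card_cons]
        · have hnm : y ∉ ((x :: xs : List Char) : Multiset Char) := by
            intro hmem
            rcases List.mem_cons.mp (Multiset.mem_coe.mp hmem) with hm | hm
            · exact hxy hm.symm
            · exact hxy (le_antisymm ((List.pairwise_cons.mp hx).1 y hm) (not_lt.mp hlt))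
          have e1 : ((x :: xs : List Char) : Multiset Char) - ((y :: ys : List Char) : Multiset Char)
              = ((x :: xs : List Char) : Multiset Char) - (ys : Multiset Char) := by
            rw [show ((y :: ys : List Char) : Multiset Char) = y ::ₘ (ys : Multiset Char) from
              (Multiset.cons_coe y ys).symm, Multiset.sub_cons, Multiset.erase_of_notMem hnm]
          have e2 : ((y :: ys : List Char) : Multiset Char) - ((x :: xs : List Char) : Multiset Char)
              = y ::ₘ ((ys : Multiset Char) - ((x :: xs : List Char) : Multiset Char)) := by
            rw [show ((y :: ys : List Char) : Multiset Char) = y ::ₘ (ys : Multiset Char) from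
              (Multiset.cons_coe y ys).symm]
            exact cons_sub_of_not_mem hnm
          simp only [mergeCount, if_neg hxy, if_neg hlt,
            ih (x :: xs) ys (by simp; omega) hx hys, e1, e2, Multiset.card_cons]

theorem mergeCount_spec (xs ys : List Char)
    (hx : xs.Pairwise (· ≤ ·)) (hy : ys.Pairwise (· ≤ ·)) :
    mergeCount xs ys =
      (((xs : Multiset Char) - (ys : Multiset Char)).card,
       ((ys : Multiset Char) - (xs : Multiset Char)).card) :=
  mergeCount_spec_aux (xs.length + ys.length) xs ys le_rfl hx hy

-- ===== VERDICT (by name: the statement is the Claim_ definition above) =====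
theorem check_spec : Claim_equal_check := by
  intro word1 word2 _
  unfold Spec_check check check_alt
  simp only [foldl_checkRemoveStep]
  set l1 := word1.toList with hl1
  set l2 := word2.toList with hl2
  have hp1 : ((PySem.List.sorted l1 (fun x => x) false : List Char) : Multiset Char) = (l1 : Multiset Char) :=
    Multiset.coe_eq_coe.mpr (PySem.List.sorted_perm l1 (fun x => x) false)
  have hp2 : ((PySem.List.sorted l2 (fun x => x) false : List Char) : Multiset Char) = (l2 : Multiset Char) :=
    Multiset.coe_eq_coe.mpr (PySem.List.sorted_perm l2 (fun x => x) false)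
  have hm := mergeCount_spec (PySem.List.sorted l1 (fun x => x) false)
      (PySem.List.sorted l2 (fun x => x) false)
      (PySem.List.sorted_pairwise l1 (fun x => x))
      (PySem.List.sorted_pairwise l2 (fun x => x))
  rw [hp1, hp2] at hm
  simp only [hm]
  set a := (((l1 : Multiset Char)) - ((l2 : Multiset Char))).card with ha
  set b := (((l2 : Multiset Char)) - ((l1 : Multiset Char))).card with hb
  have hd1 : (l1.diff l2).length = a := by
    rw [ha, Multiset.coe_sub, Multiset.coe_card]
  have hd2 : (l2.diff l1).length = b := by
    rw [hb, Multiset.coe_sub, Multiset.coe_card]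
  have hc1 : l1.length = a + ((l1 : Multiset Char) ∩ (l2 : Multiset Char)).card := by
    have h := congrArg Multiset.card (Multiset.sub_add_inter (l1 : Multiset Char) (l2 : Multiset Char))
    simpa [Multiset.coe_card] using h.symm
  have hc2 : l2.length = b + ((l1 : Multiset Char) ∩ (l2 : Multiset Char)).card := by
    have h := congrArg Multiset.card (Multiset.sub_add_inter (l2 : Multiset Char) (l1 : Multiset Char))
    rw [Multiset.inter_comm] at h
    simpa [Multiset.coe_card] using h.symm
  rw [hd1, hd2]
  split_ifs with hg hi
  · simp [hi.1, hi.2]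
  · rcases not_and_or.mp hi with hcase | hcase <;> simp [hcase]
  · have hni : ¬ (a ≤ 1 ∧ b ≤ 1) := by
      intro hab
      exact hg (by omega)
    rcases not_and_or.mp hni with hcase | hcase <;> simp [hcase]
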